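-- pv_equiv track=rewrite | github.com/huyanluanyu1949/tian-chi-ruijin-mmc | util.py | make_senss
-- ===== SOURCE A (Python) =====
-- def make_senss(lines, sen_len, pad_str):
--     '''
--     seperate article with sentenses. use override window
--     '''
--     ori_senss = []    # 源语句
--     win_senss = []    # 加窗语句
--     lines_num = len(lines)
--     if not (lines_num // sen_len == lines_num / sen_len): # padding
--         lines.extend([pad_str] * (sen_len - lines_num % sen_len))
--
--     ed = sen_len
--     half_sen_len = sen_len // 2    # override window size
--     lines_num = len(lines)
--     while ed <= lines_num:
--         ori_senss.append(lines[ed - sen_len: ed])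
--         if ed + half_sen_len <= lines_num:
--             win_senss.append(lines[ed - sen_len + half_sen_len : ed + half_sen_len])
--         ed += sen_len
--     return ori_senss, win_senss
-- ===== SOURCE B (Python) =====
-- def make_senss(lines, sen_len, pad_str):
--     '''
--     seperate article with sentenses. use override window
--     '''
--     lines_num = len(lines)
--     if not (lines_num // sen_len == lines_num / sen_len):  # padding (same in-place extend as A)
--         lines.extend([pad_str] * (sen_len - lines_num % sen_len))
--     # fixed windows: chunk the padded lines into sen_len slices
--     ori_senss = [lines[i:i + sen_len] for i in range(0, len(lines), sen_len)]
--     half = sen_len // 2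
--     if half == 0:
--         # overlap of size 0: every window overlaps itself
--         win_senss = list(ori_senss)
--     else:
--         # stitch adjacent fixed windows instead of re-slicing lines
--         win_senss = [a[half:] + b[:half] for a, b in zip(ori_senss, ori_senss[1:])]
--     return ori_senss, win_senss
-- ===== Notes on version B (the rewrite author's own statement) =====
-- stated objective: alternative
-- what changed: B keeps A's in-place padding but replaces A's single while-loop that slices lines twice per step by chunking the padded lines once into fixed sen_len windows and then stitching adjacent chunks (a[half:] + b[:half]) to form the overlapping windows.
import Mathlib
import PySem

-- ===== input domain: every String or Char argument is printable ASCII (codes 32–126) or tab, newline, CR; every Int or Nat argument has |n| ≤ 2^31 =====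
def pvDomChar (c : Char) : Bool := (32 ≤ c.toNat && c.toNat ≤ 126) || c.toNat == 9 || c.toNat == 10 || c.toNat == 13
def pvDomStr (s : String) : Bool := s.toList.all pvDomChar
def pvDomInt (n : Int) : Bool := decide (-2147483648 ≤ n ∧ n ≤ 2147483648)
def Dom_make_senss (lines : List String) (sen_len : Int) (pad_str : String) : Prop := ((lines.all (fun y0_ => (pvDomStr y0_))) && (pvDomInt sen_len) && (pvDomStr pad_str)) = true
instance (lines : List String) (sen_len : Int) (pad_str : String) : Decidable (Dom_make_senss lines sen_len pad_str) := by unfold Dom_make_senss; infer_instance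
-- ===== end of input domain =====

-- B builds the overlapping windows by stitching adjacent fixed windows instead of re-slicing
-- `lines` inside the while-loop ('alternative' objective; no speed claim).
-- A mutates its `lines` argument in place (the padding `extend`); B's Python performs the same
-- mutation, and the equivalence proved here is about the return value.

-- ===== PORT A =====
-- A's padding step (shared verbatim by B's Python): the float test
-- `lines_num // sen_len == lines_num / sen_len` is ported as `mod lines_num sen_len = 0`
-- (it is exactly divisibility; on the domain's magnitudes the float quotient is exact,
-- and for sen_len = 0 Python raises ZeroDivisionError — excluded by Pre_).
def msPad (lines : List String) (sen_len : Int) (pad_str : String) : List String :=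
  if PySem.Int.mod (lines.length : Int) sen_len = 0 then lines
  else lines ++ List.replicate (sen_len - PySem.Int.mod (lines.length : Int) sen_len).toNat pad_str

-- the while-loop of A, with a fuel guard for totality only: on Pre_ (1 ≤ sen_len) the loop
-- runs at most `n` times and the fuel `n + 1` supplied below is never exhausted.
def msLoopA (lines : List String) (s half n : Int) :
    Nat → Int → List (List String) → List (List String) → List (List String) × List (List String)
  | 0, _, ori, win => (ori, win)
  | fuel + 1, ed, ori, win =>
    if ed ≤ n then
      msLoopA lines s half n fuel (ed + s)
        (ori ++ [PySem.List.slice lines (some (ed - s)) (some ed)])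
        (if ed + half ≤ n
          then win ++ [PySem.List.slice lines (some (ed - s + half)) (some (ed + half))]
          else win)
    else (ori, win)

def make_senss (lines : List String) (sen_len : Int) (pad_str : String) :
    List (List String) × List (List String) :=
  msLoopA (msPad lines sen_len pad_str) sen_len (PySem.Int.floordiv sen_len 2)
    ((msPad lines sen_len pad_str).length : Int)
    ((msPad lines sen_len pad_str).length + 1) sen_len [] []

-- ===== PORT B =====
-- B's comprehension `[lines[i:i+sen_len] for i in range(0, len(lines), sen_len)]`
def msOriB (L : List String) (sen_len : Int) : List (List String) :=
  (PySem.List.pyRange 0 (L.length : Int) sen_len).map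
    (fun i => PySem.List.slice L (some i) (some (i + sen_len)))

-- B's `list(ori)` / `[a[half:] + b[:half] for a, b in zip(ori, ori[1:])]`
def msWinsB (ori : List (List String)) (half : Int) : List (List String) :=
  if half = 0 then ori
  else (ori.zip ori.tail).map
    (fun p => PySem.List.slice p.1 (some half) none ++ PySem.List.slice p.2 none (some half))

def make_senss_alt (lines : List String) (sen_len : Int) (pad_str : String) :
    List (List String) × List (List String) :=
  (msOriB (msPad lines sen_len pad_str) sen_len,
   msWinsB (msOriB (msPad lines sen_len pad_str) sen_len) (PySem.Int.floordiv sen_len 2))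

-- ===== PRECONDITION & SPEC =====
-- Pre_ excludes sen_len ≤ 0: there A never returns (sen_len = 0 raises ZeroDivisionError,
-- sen_len < 0 loops forever); A returns normally on every input with 1 ≤ sen_len.
def Pre_make_senss (lines : List String) (sen_len : Int) (pad_str : String) : Prop :=
  1 ≤ sen_len
instance (lines : List String) (sen_len : Int) (pad_str : String) : Decidable (Pre_make_senss lines sen_len pad_str) := by unfold Pre_make_senss; infer_instance

def pvWitness_make_senss : List String × Int × String := (["a", "b", "c"], 2, "p")

def Spec_make_senss (lines : List String) (sen_len : Int) (pad_str : String) (out : List (List String) × List (List String)) : Prop := out = make_senss_alt lines sen_len pad_str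
instance (lines : List String) (sen_len : Int) (pad_str : String) (out : List (List String) × List (List String)) : Decidable (Spec_make_senss lines sen_len pad_str out) := by unfold Spec_make_senss; infer_instance

-- ===== CLAIM (what is proved, stated in full; the proofs are below) =====
def Claim_equal_make_senss : Prop := ∀ (lines : List String) (sen_len : Int) (pad_str : String), Dom_make_senss lines sen_len pad_str → Pre_make_senss lines sen_len pad_str → Spec_make_senss lines sen_len pad_str (make_senss lines sen_len pad_str)

-- ===== LEMMAS AND PROOFS =====

-- proof-only abbreviations: the two window slices and the overlapping-window count
def msChunk (L : List String) (s : Int) (j : Nat) : List String :=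
  PySem.List.slice L (some ((j : Int) * s)) (some ((j : Int) * s + s))

def msWin (L : List String) (s half : Int) (j : Nat) : List String :=
  PySem.List.slice L (some ((j : Int) * s + half)) (some ((j : Int) * s + s + half))

def msWcount (m : Nat) (half : Int) : Nat := if half = 0 then m else m - 1

lemma msWcount_le (m : Nat) (half : Int) : msWcount m half ≤ m := by
  unfold msWcount; split <;> omega

-- after padding, the length is a multiple of sen_len
lemma msPad_dvd (lines : List String) (s : Int) (p : String) (hs : 1 ≤ s) :
    ∃ m : Nat, ((msPad lines s p).length : Int) = (m : Int) * s := by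
  unfold msPad
  split
  · rename_i h
    obtain ⟨c, hc⟩ := (PySem.Int.mod_eq_zero_iff_dvd _ _).mp h
    have hc0 : 0 ≤ c := by nlinarith [Int.natCast_nonneg lines.length]
    exact ⟨c.toNat, by rw [hc, Int.toNat_of_nonneg hc0]; ring⟩
  · rename_i h
    have hmod : PySem.Int.mod (lines.length : Int) s = (lines.length : Int) % s :=
      PySem.Int.mod_eq_emod_of_pos (by omega)
    have h1 : 0 ≤ (lines.length : Int) % s := Int.emod_nonneg _ (by omega)
    have h2 : (lines.length : Int) % s < s := Int.emod_lt_of_pos _ (by omega)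
    have hde : s * ((lines.length : Int) / s) + (lines.length : Int) % s = lines.length :=
      Int.mul_ediv_add_emod _ _
    have hq : 0 ≤ (lines.length : Int) / s := Int.ediv_nonneg (by positivity) (by omega)
    refine ⟨((lines.length : Int) / s + 1).toNat, ?_⟩
    rw [hmod]
    simp only [List.length_append, List.length_replicate]
    push_cast [Int.toNat_of_nonneg (by omega : (0:Int) ≤ s - (lines.length : Int) % s),
      Int.toNat_of_nonneg (by omega : (0:Int) ≤ (lines.length : Int) / s + 1)]
    nlinarith [hde]

-- A's while-loop produces exactly the fixed windows k..m-1 and the overlapping windows k..wcount-1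
lemma msLoopA_eq (L : List String) (s half : Int) (hs : 1 ≤ s) (hh0 : 0 ≤ half)
    (hhs : half < s) (m : Nat) :
    ∀ (fuel k : Nat), m - k ≤ fuel → ∀ ori win,
      msLoopA L s half ((m : Int) * s) fuel ((k : Int) * s + s) ori win =
        (ori ++ (List.range' k (m - k)).map (msChunk L s),
         win ++ (List.range' k (msWcount m half - k)).map (msWin L s half)) := by
  intro fuel
  induction fuel with
  | zero =>
      intro k hk ori win
      have h1 : m - k = 0 := by omega
      have h2 : msWcount m half - k = 0 := by have := msWcount_le m half; omega
      simp [msLoopA, h1, h2]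
  | succ fuel ih =>
      intro k hk ori win
      by_cases hkm : k < m
      · have hg : (k : Int) * s + s ≤ (m : Int) * s := by
          have h1 : ((k : Int) + 1) * s ≤ (m : Int) * s :=
            (Int.mul_le_mul_iff_of_pos_right (by omega)).mpr (by exact_mod_cast hkm)
          linarith
        have hwin : ((k : Int) * s + s + half ≤ (m : Int) * s) ↔ k < msWcount m half := by
          unfold msWcount
          by_cases hz : half = 0
          · subst hz
            simp only [add_zero]
            exact ⟨fun _ => hkm, fun _ => hg⟩
          · rw [if_neg hz]
            have hh1 : 1 ≤ half := by omega
            constructor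
            · intro hle
              have h1 : ((k : Int) + 1) * s < (m : Int) * s := by nlinarith
              have h2 : ((k : Int) + 1) < (m : Int) :=
                lt_of_mul_lt_mul_right h1 (by omega)
              have : (k : Nat) + 1 < m := by exact_mod_cast h2
              omega
            · intro hlt
              have h2 : ((k : Int) + 2) ≤ (m : Int) := by
                have : (k : Nat) + 2 ≤ m := by omega
                exact_mod_cast this
              nlinarith
        simp only [msLoopA, if_pos hg]
        have e1 : (k : Int) * s + s - s = (k : Int) * s := by ring
        have e3 : (k : Int) * s + s + s = ((k + 1 : Nat) : Int) * s + s := by push_cast; ring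
        rw [e1, e3, ih (k + 1) (by omega)]
        have hrc : List.range' k (m - k) = k :: List.range' (k + 1) (m - (k + 1)) := by
          have h : m - k = (m - (k + 1)) + 1 := by omega
          rw [h, List.range'_succ]
        rw [Prod.mk.injEq]
        refine ⟨?_, ?_⟩
        · rw [hrc]
          simp [msChunk]
        · by_cases hw : k < msWcount m half
          · have hwc : List.range' k (msWcount m half - k)
                = k :: List.range' (k + 1) (msWcount m half - (k + 1)) := by
              have h : msWcount m half - k = (msWcount m half - (k + 1)) + 1 := by omega
              rw [h, List.range'_succ]
            rw [if_pos (hwin.mpr hw), hwc]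
            simp [msWin]
          · have h1 : msWcount m half - k = 0 := by omega
            have h2 : msWcount m half - (k + 1) = 0 := by omega
            rw [if_neg (fun hc => hw (hwin.mp hc)), h1, h2]
            simp
      · have hg : ¬ ((k : Int) * s + s ≤ (m : Int) * s) := by
          have hmk : (m : Int) ≤ (k : Int) := by exact_mod_cast Nat.le_of_not_lt hkm
          have h1 : (m : Int) * s ≤ (k : Int) * s := by nlinarith
          omega
        have h1 : m - k = 0 := by omega
        have h2 : msWcount m half - k = 0 := by have := msWcount_le m half; omega
        simp [msLoopA, if_neg hg, h1, h2]

-- zipping a mapped range with its own tail gives the adjacent pairs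
lemma zip_tail_map {α : Type} (f : Nat → α) :
    ∀ (n a : Nat),
      ((List.range' a n).map f).zip (((List.range' a n).map f).tail)
        = (List.range' a (n - 1)).map (fun j => (f j, f (j + 1))) := by
  intro n
  induction n with
  | zero => intro a; simp
  | succ n ih =>
      intro a
      cases n with
      | zero => simp [List.range'_succ]
      | succ n =>
          have h1 : List.range' a (n + 1 + 1) = a :: List.range' (a + 1) (n + 1) :=
            List.range'_succ
          have h2 : List.range' (a + 1) (n + 1) = (a + 1) :: List.range' (a + 2) n :=
            List.range'_succ
          rw [h1]
          simp only [List.map_cons, List.tail_cons]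
          calc (f a :: (List.range' (a + 1) (n + 1)).map f).zip
                  ((List.range' (a + 1) (n + 1)).map f)
              = (f a, f (a + 1)) ::
                  (((List.range' (a + 1) (n + 1)).map f).zip
                    (((List.range' (a + 1) (n + 1)).map f).tail)) := by
                rw [h2]; simp [List.zip_cons_cons]
            _ = (f a, f (a + 1)) ::
                  (List.range' (a + 1) (n + 1 - 1)).map (fun j => (f j, f (j + 1))) := by
                rw [ih (a + 1)]
            _ = (List.range' a (n + 1 + 1 - 1)).map (fun j => (f j, f (j + 1))) := by
                simp [List.range'_succ]

-- range(0, m*s, s) enumerates the chunk starts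
lemma pyRange_chunks (s : Int) (hs : 1 ≤ s) (m : Nat) :
    PySem.List.pyRange 0 ((m : Int) * s) s = (List.range m).map (fun (j : Nat) => (j : Int) * s) := by
  rw [PySem.List.pyRange_of_pos _ _ (by omega)]
  have hcount : (if (0 : Int) < (m : Int) * s
      then (((m : Int) * s - 0 + s - 1) / s).toNat else 0) = m := by
    cases Nat.eq_zero_or_pos m with
    | inl h => subst h; simp
    | inr h =>
        have hm0 : (0 : Int) < (m : Int) := by exact_mod_cast h
        have hpos : (0 : Int) < (m : Int) * s := by positivity
        rw [if_pos hpos]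
        have he : (m : Int) * s - 0 + s - 1 = (s - 1) + (m : Int) * s := by ring
        rw [he, Int.add_mul_ediv_right _ _ (by omega : s ≠ 0),
          Int.ediv_eq_zero_of_lt (by omega) (by omega)]
        simp
  rw [hcount]
  refine List.map_congr_left ?_
  intro j _
  norm_num
  ring

-- stitching two adjacent chunks gives the overlapping window (no length side conditions:
-- Python slices and take/drop clamp identically on both sides)
lemma msStitch (L : List String) (s half : Int) (hh0 : 0 ≤ half) (hhs : half ≤ s) (j : Nat) :
    PySem.List.slice (msChunk L s j) (some half) none
        ++ PySem.List.slice (msChunk L s (j + 1)) none (some half)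
      = msWin L s half j := by
  have hs0 : 0 ≤ s := le_trans hh0 hhs
  obtain ⟨s', rfl⟩ : ∃ s' : Nat, s = (s' : Int) := ⟨s.toNat, (Int.toNat_of_nonneg hs0).symm⟩
  obtain ⟨h', rfl⟩ : ∃ h' : Nat, half = (h' : Int) := ⟨half.toNat, (Int.toNat_of_nonneg hh0).symm⟩
  have hh's : h' ≤ s' := by exact_mod_cast hhs
  have ec : ∀ i : Nat, msChunk L (s' : Int) i = (L.drop (i * s')).take s' := by
    intro i
    unfold msChunk
    rw [show ((i : Int) * s') = ((i * s' : Nat) : Int) by push_cast; ring]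
    exact PySem.List.slice_natCast_add L _ _
  have ew : msWin L (s' : Int) (h' : Int) j = (L.drop (j * s' + h')).take s' := by
    unfold msWin
    rw [show ((j : Int) * s' + h') = ((j * s' + h' : Nat) : Int) by push_cast; ring,
      show ((j : Int) * s' + s' + h') = ((j * s' + h' : Nat) : Int) + (s' : Int) by push_cast; ring]
    exact PySem.List.slice_natCast_add L _ _
  rw [ec j, ec (j + 1), ew, PySem.List.slice_from_natCast, PySem.List.slice_to_natCast,
    List.drop_take, List.drop_drop, List.take_take]
  have hmin : min h' s' = h' := by omega
  rw [hmin]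
  have hsplit : (L.drop (j * s' + h')).take s'
      = (L.drop (j * s' + h')).take (s' - h')
        ++ ((L.drop (j * s' + h')).drop (s' - h')).take h' := by
    rw [← List.take_add]
    congr 1
    omega
  rw [hsplit, List.drop_drop]
  congr 3
  have h : (j + 1) * s' = j * s' + s' := by ring
  rw [h, Nat.add_assoc]
  congr 1
  omega

-- ===== VERDICT (by name: the statement is the Claim_ definition above) =====
theorem make_senss_spec : Claim_equal_make_senss := by
  intro lines s p _ hpre
  have hs : 1 ≤ s := hpre
  unfold Spec_make_senss make_senss make_senss_alt msOriB msWinsB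
  obtain ⟨m, hm⟩ := msPad_dvd lines s p hs
  generalize hLg : msPad lines s p = L at hm ⊢
  have hfd : PySem.Int.floordiv s 2 = s / 2 := PySem.Int.floordiv_eq_ediv_of_pos (by omega)
  have hh0 : 0 ≤ s / 2 := by omega
  have hhs : s / 2 < s := by omega
  have hlen : L.length = m * s.toNat := by
    have h : (L.length : Int) = (m : Int) * (s.toNat : Int) := by
      rw [hm, Int.toNat_of_nonneg (by omega)]
    exact_mod_cast h
  have hfuel : m - 0 ≤ L.length + 1 := by
    have h1 : 1 ≤ s.toNat := by omega
    have h2 : m ≤ m * s.toNat := Nat.le_mul_of_pos_right m (by omega)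
    omega
  have hloop := msLoopA_eq L s (s / 2) hs hh0 hhs m (L.length + 1) 0 hfuel [] []
  simp only [Nat.cast_zero, zero_mul, zero_add, Nat.sub_zero, List.nil_append] at hloop
  have hori : (PySem.List.pyRange 0 ((m : Int) * s) s).map
      (fun i => PySem.List.slice L (some i) (some (i + s)))
        = (List.range m).map (msChunk L s) := by
    rw [pyRange_chunks s hs m, List.map_map]
    rfl
  rw [hfd, hm, hloop, hori]
  rw [Prod.mk.injEq]
  refine ⟨?_, ?_⟩
  · rw [List.range_eq_range']
  · by_cases hz : s / 2 = 0
    · rw [if_pos hz, hz]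
      have hwc : msWcount m (0 : Int) = m := rfl
      rw [hwc, List.range_eq_range']
      refine List.map_congr_left ?_
      intro j _
      unfold msWin msChunk
      simp
    · rw [if_neg hz]
      have hwc : msWcount m (s / 2) = m - 1 := by unfold msWcount; rw [if_neg hz]
      rw [hwc, List.range_eq_range', zip_tail_map (msChunk L s) m 0, List.map_map]
      refine (List.map_congr_left ?_).symm
      intro j _
      simp only [Function.comp_apply]
      exact msStitch L s (s / 2) hh0 (by omega) j
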